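-- pv_equiv track=rewrite | github.com/danmaps/wordle-rainwater | rainwater.py | to_elevation_map
-- ===== SOURCE A (Python) =====
-- def to_elevation_map(puzzle):
--     """takes a puzzle matrix and returns a list of heights"""
--     elevation_map = []
--
--     # for each column in the puzzle
--     for col in range(len(puzzle[0])):
--         # iterate from the top row to the bottom row
--         for row in range(len(puzzle)):
--             if puzzle[row][col] != 0:
--                 # if the cell is not black, add the height of the cell to the elevation map
--                 elevation_map.append(len(puzzle) - row)
--                 break
--         else:
--             # if the column is entirely black, add a height of 0 to the elevation map
--             elevation_map.append(0)
--
--     # return the elevation map as a list of heights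
--     return elevation_map
-- ===== SOURCE B (Python) =====
-- def to_elevation_map(puzzle):
--     """takes a puzzle matrix and returns a list of heights"""
--     rows = len(puzzle)
--     heights = [0] * len(puzzle[0])
--     # single row-major pass: a column's height is fixed by its first non-zero cell
--     for r, row in enumerate(puzzle):
--         heights = [h if h != 0 else (rows - r if row[c] != 0 else 0)
--                    for c, h in enumerate(heights)]
--     return heights
-- ===== Notes on version B (the rewrite author's own statement) =====
-- stated objective: alternative
-- what changed: Replaces A's per-column top-down scan with break (column-major, early exit per column) by a single row-major sweep that rebuilds a heights vector per row, fixing each column at its first non-zero cell (height != 0 acts as the done flag).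
import Mathlib
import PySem

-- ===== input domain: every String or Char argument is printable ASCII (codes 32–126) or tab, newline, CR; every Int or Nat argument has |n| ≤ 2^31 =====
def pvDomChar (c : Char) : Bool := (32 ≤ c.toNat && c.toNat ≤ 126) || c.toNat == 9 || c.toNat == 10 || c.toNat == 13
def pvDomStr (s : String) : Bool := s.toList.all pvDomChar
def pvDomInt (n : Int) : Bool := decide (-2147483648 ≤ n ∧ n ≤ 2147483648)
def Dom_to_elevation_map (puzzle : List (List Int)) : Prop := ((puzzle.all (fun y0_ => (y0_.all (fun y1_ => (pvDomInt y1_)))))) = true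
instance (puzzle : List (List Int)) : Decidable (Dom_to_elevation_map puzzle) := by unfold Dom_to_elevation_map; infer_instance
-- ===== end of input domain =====

-- B replaces A's per-column top-down scan (with break) by a single row-major pass
-- updating a heights vector; objective: alternative decomposition, same exact results.

-- ===== PORT A =====
-- row[col] read; Pre_ keeps every index A actually reads in range, so getD 0 never fires there
def pvCell (row : List Int) (c : Int) : Int := (PySem.List.pyGet? row c).getD 0

-- inner 'for row in range(len(puzzle))' with break / for-else
def pvScanCol (n : Int) (i : Int) (rows : List (List Int)) (col : Int) : Int :=
  match rows with
  | [] => 0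
  | r :: rest => if pvCell r col ≠ 0 then n - i else pvScanCol n (i + 1) rest col

def to_elevation_map (puzzle : List (List Int)) : List Int :=
  (PySem.List.pyRange 0 ((puzzle.headD []).length : Int) 1).foldl
    (fun acc col => acc ++ [pvScanCol (puzzle.length : Int) 0 puzzle col]) []

-- ===== PORT B =====
-- one comprehension step: heights = [h if h != 0 else (rows - r if row[c] != 0 else 0) ...]
def pvStepB (n r : Int) (row : List Int) (hs : List Int) : List Int :=
  (PySem.List.enumerate hs 0).map
    (fun ch => if ch.2 ≠ 0 then ch.2 else if pvCell row ch.1 ≠ 0 then n - r else 0)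

def to_elevation_map_alt (puzzle : List (List Int)) : List Int :=
  (PySem.List.enumerate puzzle 0).foldl
    (fun hs rr => pvStepB (puzzle.length : Int) rr.1 rr.2 hs)
    (List.replicate (puzzle.headD []).length 0)

-- ===== PRECONDITION & SPEC =====
-- Pre_ excludes exactly the inputs where the Python A raises IndexError: the empty
-- puzzle (puzzle[0]) and puzzles where some column scan reaches a row too short for
-- that column before meeting a non-zero cell.
def Pre_to_elevation_map (puzzle : List (List Int)) : Prop :=
  puzzle ≠ [] ∧
  ∀ c < (puzzle.headD []).length, ∀ r < puzzle.length,
    ((puzzle.getD r []).length ≤ c ∧ ∀ r' < r, c < (puzzle.getD r' []).length) →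
    ∃ r' < r, (puzzle.getD r' []).getD c 0 ≠ 0
instance (puzzle : List (List Int)) : Decidable (Pre_to_elevation_map puzzle) := by unfold Pre_to_elevation_map; infer_instance

def pvWitness_to_elevation_map : List (List Int) := [[0, 1], [1, 0]]

def Spec_to_elevation_map (puzzle : List (List Int)) (out : List Int) : Prop := out = to_elevation_map_alt puzzle
instance (puzzle : List (List Int)) (out : List Int) : Decidable (Spec_to_elevation_map puzzle out) := by unfold Spec_to_elevation_map; infer_instance

-- ===== CLAIM (what is proved, stated in full; the proofs are below) =====
def Claim_equal_to_elevation_map : Prop := ∀ (puzzle : List (List Int)), Dom_to_elevation_map puzzle → Pre_to_elevation_map puzzle → Spec_to_elevation_map puzzle (to_elevation_map puzzle)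

-- ===== LEMMAS AND PROOFS =====

-- B's enumerate-foldl as explicit index recursion
def pvFoldB (n : Int) (rs : List (List Int)) (i : Int) (hs : List Int) : List Int :=
  match rs with
  | [] => hs
  | r :: rest => pvFoldB n rest (i + 1) (pvStepB n i r hs)

theorem pvFoldB_eq_foldl (n : Int) :
    ∀ (rs : List (List Int)) (i : Int) (hs : List Int),
      (PySem.List.enumerate rs i).foldl (fun hs rr => pvStepB n rr.1 rr.2 hs) hs
        = pvFoldB n rs i hs := by
  intro rs
  induction rs with
  | nil => intro i hs; simp [PySem.List.enumerate_nil, pvFoldB]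
  | cons r rest ih =>
      intro i hs
      simp [PySem.List.enumerate_cons, pvFoldB, ih]

theorem pvStepB_eq_mapIdx (n r : Int) (row : List Int) (hs : List Int) :
    pvStepB n r row hs
      = hs.mapIdx (fun c h => if h ≠ 0 then h else if pvCell row (c : Int) ≠ 0 then n - r else 0) := by
  apply List.ext_getElem
  · simp [pvStepB, PySem.List.length_enumerate]
  · intro k h1 h2
    simp [pvStepB, PySem.List.length_enumerate] at h1
    simp [pvStepB, PySem.List.getElem_enumerate, List.getElem_mapIdx]

theorem pvFoldB_eq_mapIdx (n : Int) :
    ∀ (rs : List (List Int)) (i : Int) (hs : List Int), i + rs.length ≤ n →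
      pvFoldB n rs i hs
        = hs.mapIdx (fun c h => if h ≠ 0 then h else pvScanCol n i rs (c : Int)) := by
  intro rs
  induction rs with
  | nil =>
      intro i hs _
      show hs = _
      apply List.ext_getElem
      · simp
      · intro k h1 h2
        simp [List.getElem_mapIdx, pvScanCol]
  | cons r rest ih =>
      intro i hs hle
      have hle' : (i + 1) + (rest.length : Int) ≤ n := by
        simp at hle; push_cast at hle ⊢; omega
      have hni : n - i ≠ 0 := by
        simp at hle; push_cast at hle; omega
      show pvFoldB n rest (i + 1) (pvStepB n i r hs) = _
      rw [ih (i + 1) _ hle', pvStepB_eq_mapIdx]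
      apply List.ext_getElem
      · simp
      · intro k h1 h2
        have hk : k < hs.length := by simpa using h2
        simp [List.getElem_mapIdx]
        by_cases h0 : hs[k] = 0
        · simp [h0, pvScanCol]
          by_cases hc : pvCell r (k : Int) = 0
          · simp [hc]
          · simp [hc, hni]
        · simp [h0]

theorem port_A_eq_map (puzzle : List (List Int)) :
    to_elevation_map puzzle
      = (PySem.List.pyRange 0 ((puzzle.headD []).length : Int) 1).map
          (pvScanCol (puzzle.length : Int) 0 puzzle) := by
  unfold to_elevation_map
  rw [PySem.List.foldl_append_singleton_eq_map]
  simp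

theorem ports_agree (puzzle : List (List Int)) :
    to_elevation_map puzzle = to_elevation_map_alt puzzle := by
  rw [port_A_eq_map]
  rw [show to_elevation_map_alt puzzle
        = (PySem.List.enumerate puzzle 0).foldl
            (fun hs rr => pvStepB (puzzle.length : Int) rr.1 rr.2 hs)
            (List.replicate (puzzle.headD []).length 0) from rfl]
  rw [pvFoldB_eq_foldl, pvFoldB_eq_mapIdx _ _ _ _ (by simp)]
  apply List.ext_getElem
  · simp [PySem.List.length_pyRange_one]
  · intro k h1 h2
    have hk : k < (puzzle.headD []).length := by
      simpa [PySem.List.length_pyRange_one] using h1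
    simp [List.getElem_map, List.getElem_mapIdx, PySem.List.getElem_pyRange_one]

-- ===== VERDICT (by name: the statement is the Claim_ definition above) =====
theorem to_elevation_map_spec : Claim_equal_to_elevation_map := by
  intro puzzle _ _
  show to_elevation_map puzzle = to_elevation_map_alt puzzle
  exact ports_agree puzzle
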